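-- pv_equiv track=rewrite | github.com/LeMon0526/CODE | MD5.py | AddPlainText
-- ===== SOURCE A (Python) =====
-- def AddPlainText(plainText):
--
--     length = len(plainText)
--     plainText = list(map(hex,map(ord,plainText)))       #将明文转换为16进制列表
--     for num in range(len(plainText)):
--         plainText[num] = plainText[num][2:]             #除去前面的'0x'
--
--     #补充100000.....000
--     plainText.append('80')
--     while (len(plainText)*8+64)%512 != 0:
--         plainText.append('00')
--
--     #加入原明文长度(左对齐)
--     length = hex(length * 8)[2:]
--     length = length.ljust(16,'0')
--     lengthList = []
--     for num in range(len(length)):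
--         if num % 2 == 0:
--             lengthList.append(length[num] + length[num + 1])
--
--     plainText.extend(lengthList)
--     return plainText
-- ===== SOURCE B (Python) =====
-- def AddPlainText(plainText):
--     body = [format(ord(c), 'x') for c in plainText]
--     pad = (55 - len(body)) % 64
--     lenhex = format(len(plainText) * 8, 'x').ljust(16, '0')
--     return body + ['80'] + ['00'] * pad + [lenhex[i:i + 2] for i in range(0, len(lenhex), 2)]
-- ===== Notes on version B (the rewrite author's own statement) =====
-- stated objective: simpler
-- what changed: B replaces A's append-until-aligned while loop by a closed-form pad count (55 - len) % 64 and A's index-parity loop over the length field by a stride-2 slicing comprehension, assembling the result as one concatenation instead of in-place mutation.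
import Mathlib
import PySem

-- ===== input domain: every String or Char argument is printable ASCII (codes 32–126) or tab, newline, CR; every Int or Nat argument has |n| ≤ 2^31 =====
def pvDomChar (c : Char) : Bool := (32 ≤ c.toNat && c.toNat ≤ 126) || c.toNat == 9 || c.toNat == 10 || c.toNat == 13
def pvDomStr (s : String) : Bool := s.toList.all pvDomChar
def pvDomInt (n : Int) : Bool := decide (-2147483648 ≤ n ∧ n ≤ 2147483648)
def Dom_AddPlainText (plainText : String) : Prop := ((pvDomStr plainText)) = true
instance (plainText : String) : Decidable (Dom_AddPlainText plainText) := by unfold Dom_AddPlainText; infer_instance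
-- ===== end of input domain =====

-- B replaces A's '00'-appending while loop by a closed-form pad count and A's
-- index-parity length loop by a stride-2 slicing comprehension (objective: simpler).

-- hex digit of a value 0..15, lowercase — exact for Python's hex digits
def pyHexDigit (n : Nat) : Char := if n < 10 then Char.ofNat (48 + n) else Char.ofNat (87 + n)

-- hand port (PySem has no hex): the digits of hex(n) / format(n,'x') for n ≥ 0, exact
def hexChars (n : Nat) : List Char :=
  if n < 16 then [pyHexDigit n] else hexChars (n / 16) ++ [pyHexDigit (n % 16)]
decreasing_by exact Nat.div_lt_self (by omega) (by omega)

-- hand port of str.ljust(w, f) on the char list — exact for a Nat width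
def ljustChars (cs : List Char) (w : Nat) (f : Char) : List Char :=
  cs ++ List.replicate (w - cs.length) f

-- ===== PORT A =====
-- A's while loop: append '00' until (len*8+64) % 512 == 0
def padLoop (xs : List String) : List String :=
  if (xs.length * 8 + 64) % 512 ≠ 0 then padLoop (xs ++ ["00"]) else xs
termination_by (120 - xs.length % 64) % 64
decreasing_by simp only [List.length_append, List.length_cons, List.length_nil]; omega

def AddPlainText (plainText : String) : List String :=
  let length := plainText.toList.length
  let pt1 : List String := plainText.toList.map (fun c => String.ofList ('0' :: 'x' :: hexChars c.toNat))
  -- for num in range(len): plainText[num] = plainText[num][2:]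
  let pt2 : List String := pt1.map (fun s => String.ofList (PySem.List.slice s.toList (some 2) none))
  let pt3 := padLoop (pt2 ++ ["80"])
  let lengthCs := ljustChars (hexChars (length * 8)) 16 '0'
  -- for num in range(len(length)): if num % 2 == 0: append(length[num] + length[num+1])
  -- (pyGetD's default is unreachable under Pre_, which excludes the only out-of-range case)
  let lengthList : List String :=
    (PySem.List.pyRange 0 (lengthCs.length : Int) 1).foldl
      (fun acc num => if PySem.Int.mod num 2 = 0 then
          acc ++ [String.ofList [PySem.List.pyGetD lengthCs num ' ', PySem.List.pyGetD lengthCs (num + 1) ' ']]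
        else acc) []
  pt3 ++ lengthList

-- ===== PORT B =====
def AddPlainText_alt (plainText : String) : List String :=
  let body := plainText.toList.map (fun c => String.ofList (hexChars c.toNat))
  -- pad = (55 - len(body)) % 64 : a nonneg count, so .toNat is exact
  let pad := (PySem.Int.mod (55 - (body.length : Int)) 64).toNat
  let lenhex := ljustChars (hexChars (plainText.toList.length * 8)) 16 '0'
  body ++ ["80"] ++ List.replicate pad "00"
    ++ (PySem.List.pyRange 0 (lenhex.length : Int) 2).map
        (fun i => String.ofList (PySem.List.slice lenhex (some i) (some (i + 2))))

-- ===== PRECONDITION & SPEC =====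
-- Pre_ excludes only the (astronomically large) inputs where hex(8*len) has an odd
-- number of digits exceeding the ljust width 16: there A raises IndexError
-- (length[num+1] past the end); B returns a trailing 1-char slice instead.
def Pre_AddPlainText (plainText : String) : Prop :=
  Nat.log 16 (plainText.toList.length * 8) + 1 ≤ 16 ∨
  (Nat.log 16 (plainText.toList.length * 8) + 1) % 2 = 0
instance (plainText : String) : Decidable (Pre_AddPlainText plainText) := by
  unfold Pre_AddPlainText; infer_instance

def pvWitness_AddPlainText : String := "ab"

def Spec_AddPlainText (plainText : String) (out : List String) : Prop := out = AddPlainText_alt plainText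
instance (plainText : String) (out : List String) : Decidable (Spec_AddPlainText plainText out) := by unfold Spec_AddPlainText; infer_instance

-- ===== CLAIM (what is proved, stated in full; the proofs are below) =====
def Claim_equal_AddPlainText : Prop := ∀ (plainText : String), Dom_AddPlainText plainText → Pre_AddPlainText plainText → Spec_AddPlainText plainText (AddPlainText plainText)

-- ===== LEMMAS AND PROOFS =====

theorem hexChars_length (n : Nat) : (hexChars n).length = Nat.log 16 n + 1 := by
  fun_induction hexChars n with
  | case1 n h =>
      simp [Nat.log_of_lt h]
  | case2 n h ih =>
      have hpos : 0 < Nat.log 16 n := Nat.log_pos (by omega) (by omega)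
      have hdiv : Nat.log 16 (n / 16) = Nat.log 16 n - 1 := Nat.log_div_base 16 n
      rw [List.length_append, ih, hdiv]
      simp
      omega

theorem padLoop_eq (xs : List String) :
    padLoop xs = xs ++ List.replicate ((120 - xs.length % 64) % 64) "00" := by
  fun_induction padLoop xs with
  | case1 xs h ih =>
      have hm : (120 - xs.length % 64) % 64
          = (120 - (xs ++ ["00"]).length % 64) % 64 + 1 := by
        simp only [List.length_append, List.length_cons, List.length_nil]
        omega
      rw [ih, hm, List.replicate_succ]
      simp only [List.append_assoc, List.cons_append, List.nil_append]
  | case2 xs h =>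
      have : (120 - xs.length % 64) % 64 = 0 := by omega
      simp [this]

-- the even Int indices 0,2,…,2m-2
def evens (m : Nat) : List Int := (List.range m).map (fun k : Nat => 2 * (k : Int))

theorem pyRange_two (m : Nat) : PySem.List.pyRange 0 (2 * (m : Int)) 2 = evens m := by
  rw [PySem.List.pyRange_of_pos 0 (2 * (m : Int)) (by omega)]
  rcases Nat.eq_zero_or_pos m with hm | hm
  · subst hm; simp [evens]
  · rw [if_pos (by omega)]
    have : ((2 * (m : Int) - 0 + 2 - 1) / 2).toNat = m := by omega
    rw [this]
    unfold evens
    apply List.map_congr_left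
    intro k _
    omega

theorem filter_evens (m : Nat) :
    List.filter (fun num => decide (PySem.Int.mod num 2 = 0))
      (PySem.List.pyRange 0 (2 * (m : Int)) 1) = evens m := by
  induction m with
  | zero => simp [PySem.List.pyRange_one_eq_nil, evens]
  | succ m ih =>
      have hsplit : PySem.List.pyRange 0 (2 * ((m + 1 : Nat) : Int)) 1
          = PySem.List.pyRange 0 (2 * (m : Int)) 1 ++ [(2 * m : Int), (2 * m + 1 : Int)] := by
        push_cast
        rw [show (2 * ((m : Int) + 1)) = (2 * m + 1) + 1 by ring,
          PySem.List.pyRange_one_succ_right (by omega),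
          show ((2 : Int) * m + 1) = (2 * m) + 1 by ring,
          PySem.List.pyRange_one_succ_right (by omega)]
        simp
      have he : PySem.Int.mod ((2 * m : Nat) : Int) 2 = 0 := by
        rw [PySem.Int.mod_eq_emod_of_pos (by omega)]; omega
      have ho : PySem.Int.mod ((2 * m : Int) + 1) 2 = 1 := by
        rw [PySem.Int.mod_eq_emod_of_pos (by omega)]; omega
      rw [hsplit, List.filter_append, ih]
      have he' : PySem.Int.mod (2 * (m : Int)) 2 = 0 := by push_cast at he ⊢; exact he
      simp only [List.filter_cons, List.filter_nil, he', ho, decide_eq_true_eq]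
      simp [evens, List.range_succ]

theorem take_two_drop (s : List Char) (k : Nat) (h : k + 1 < s.length) :
    List.take 2 (List.drop k s) = [s[k], s[k + 1]] := by
  have h1 : List.drop k s = s[k] :: List.drop (k + 1) s := (List.getElem_cons_drop (by omega)).symm
  have h2 : List.drop (k + 1) s = s[k + 1] :: List.drop (k + 2) s := (List.getElem_cons_drop (by omega)).symm
  rw [h1, h2, List.take_succ_cons, List.take_succ_cons, List.take_zero]

theorem pairs_eq (s : List Char) (h2 : s.length % 2 = 0) :
    (PySem.List.pyRange 0 (s.length : Int) 1).foldl
      (fun acc num => if PySem.Int.mod num 2 = 0 then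
          acc ++ [String.ofList [PySem.List.pyGetD s num ' ', PySem.List.pyGetD s (num + 1) ' ']]
        else acc) []
    = (PySem.List.pyRange 0 (s.length : Int) 2).map
        (fun i => String.ofList (PySem.List.slice s (some i) (some (i + 2)))) := by
  obtain ⟨m, hm⟩ : ∃ m, s.length = 2 * m := ⟨s.length / 2, by omega⟩
  have hcast : (s.length : Int) = 2 * (m : Int) := by rw [hm]; push_cast; ring
  rw [hcast]
  have hfn : (fun (acc : List String) (num : Int) => if PySem.Int.mod num 2 = 0 then
          acc ++ [String.ofList [PySem.List.pyGetD s num ' ', PySem.List.pyGetD s (num + 1) ' ']]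
        else acc)
      = (fun acc num => if (fun num => decide (PySem.Int.mod num 2 = 0)) num = true then
          acc ++ [(fun num => String.ofList [PySem.List.pyGetD s num ' ', PySem.List.pyGetD s (num + 1) ' ']) num]
        else acc) := by
    funext acc num; simp
  rw [hfn, PySem.List.foldl_append_if, filter_evens, pyRange_two, List.nil_append]
  apply List.map_congr_left
  intro i hi
  simp only [evens, List.mem_map, List.mem_range] at hi
  obtain ⟨k, hk, hik⟩ := hi
  subst hik
  rw [show (2 * (k : Int)) = ((2 * k : Nat) : Int) by push_cast; ring]
  have hlt : 2 * k + 1 < s.length := by omega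
  have hslice : PySem.List.slice s (some ((2 * k : Nat) : Int)) (some (((2 * k : Nat) : Int) + 2))
      = List.take 2 (List.drop (2 * k) s) := by
    rw [show (((2 * k : Nat) : Int) + 2) = ((2 * k : Nat) : Int) + ((2 : Nat) : Int) by push_cast; ring]
    exact PySem.List.slice_natCast_add s (2 * k) 2
  rw [hslice, take_two_drop s (2 * k) hlt]
  have hg1 : PySem.List.pyGetD s ((2 * k : Nat) : Int) ' ' = s[2 * k] := by
    rw [PySem.List.pyGetD_natCast]; exact List.getD_eq_getElem s ' ' (by omega)
  have hg2 : PySem.List.pyGetD s (((2 * k : Nat) : Int) + 1) ' ' = s[2 * k + 1] := by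
    rw [show (((2 * k : Nat) : Int) + 1) = ((2 * k + 1 : Nat) : Int) by push_cast; ring,
      PySem.List.pyGetD_natCast]
    exact List.getD_eq_getElem s ' ' (by omega)
  rw [hg1, hg2]

theorem pad_count (n : Nat) :
    (PySem.Int.mod (55 - (n : Int)) 64).toNat = (120 - (n + 1) % 64) % 64 := by
  rw [PySem.Int.mod_eq_emod_of_pos (by omega)]
  omega

-- ===== VERDICT (by name: the statement is the Claim_ definition above) =====
theorem AddPlainText_spec : Claim_equal_AddPlainText := by
  intro plainText _ hPre
  unfold Spec_AddPlainText AddPlainText AddPlainText_alt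
  simp only []
  set len := plainText.toList.length with hlen
  set lenCs := ljustChars (hexChars (len * 8)) 16 '0' with hlenCs
  have hbody : plainText.toList.map (fun s => String.ofList (PySem.List.slice (String.ofList ('0' :: 'x' :: hexChars s.toNat)).toList (some 2) none))
      = plainText.toList.map (fun c => String.ofList (hexChars c.toNat)) := by
    apply List.map_congr_left
    intro c _
    rw [String.toList_ofList, PySem.List.slice_from _ (by omega : (0:Int) ≤ 2)]
    simp
  have hLeven : lenCs.length % 2 = 0 := by
    rw [hlenCs]
    unfold ljustChars
    rw [List.length_append, List.length_replicate, hexChars_length]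
    unfold Pre_AddPlainText at hPre
    rw [← hlen] at hPre
    omega
  rw [List.map_map]
  simp only [Function.comp_def]
  rw [hbody, padLoop_eq, pairs_eq lenCs hLeven]
  have hlenb : ((plainText.toList.map (fun c => String.ofList (hexChars c.toNat))) ++ ["80"]).length
      = len + 1 := by rw [List.length_append, List.length_map, hlen]; rfl
  rw [hlenb, ← pad_count len]
  have hpadlen : (plainText.toList.map (fun c => String.ofList (hexChars c.toNat))).length = len := by
    rw [List.length_map, hlen]
  rw [hpadlen]
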